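-- pv_equiv track=rewrite | github.com/UCSF-DataSci/ds217-02-git-happens-Dellaraam | src/data_analysis_functions.py | analyze_grade_distribution
-- ===== SOURCE A (Python) =====
-- def analyze_grade_distribution(students):
--     """Count grades by letter grade."""
--     # TODO: Count A (90-100), B (80-89), etc.
--     letter_grades = {
--         'A (90-100)': 0,
--         'B (80-89)': 0,
--         'C (70-79)': 0,
--         'D (60-69)': 0,
--         'F (0-59)': 0
--         }
--     for student in students:
--         if student['grade'] >= 90:
--             letter_grades['A (90-100)'] += 1
--         if student['grade'] >= 80:
--             letter_grades['B (80-89)'] += 1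
--         if student['grade'] >= 70:
--             letter_grades['C (70-79)'] += 1
--         if student['grade'] >= 60:
--             letter_grades['D (60-69)'] += 1
--         else:
--             letter_grades['F (0-59)'] += 1
--     return letter_grades
--     pass
-- ===== SOURCE B (Python) =====
-- def _bisect_left(a, x):
--     lo, hi = 0, len(a)
--     while lo < hi:
--         mid = (lo + hi) // 2
--         if a[mid] < x:
--             lo = mid + 1
--         else:
--             hi = mid
--     return lo
--
--
-- def analyze_grade_distribution(students):
--     """Count grades by letter grade (cumulative thresholds, as in A)."""
--     grades = sorted(s['grade'] for s in students)
--     n = len(grades)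
--     return {
--         'A (90-100)': n - _bisect_left(grades, 90),
--         'B (80-89)': n - _bisect_left(grades, 80),
--         'C (70-79)': n - _bisect_left(grades, 70),
--         'D (60-69)': n - _bisect_left(grades, 60),
--         'F (0-59)': _bisect_left(grades, 60),
--     }
-- ===== Notes on version B (the rewrite author's own statement) =====
-- stated objective: alternative
-- what changed: Replaces the per-student chain of threshold ifs with building the sorted grade list once and reading each cumulative bucket off it as n - bisect_left(grades, threshold) (F = bisect_left(grades, 60)).
import Mathlib
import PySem

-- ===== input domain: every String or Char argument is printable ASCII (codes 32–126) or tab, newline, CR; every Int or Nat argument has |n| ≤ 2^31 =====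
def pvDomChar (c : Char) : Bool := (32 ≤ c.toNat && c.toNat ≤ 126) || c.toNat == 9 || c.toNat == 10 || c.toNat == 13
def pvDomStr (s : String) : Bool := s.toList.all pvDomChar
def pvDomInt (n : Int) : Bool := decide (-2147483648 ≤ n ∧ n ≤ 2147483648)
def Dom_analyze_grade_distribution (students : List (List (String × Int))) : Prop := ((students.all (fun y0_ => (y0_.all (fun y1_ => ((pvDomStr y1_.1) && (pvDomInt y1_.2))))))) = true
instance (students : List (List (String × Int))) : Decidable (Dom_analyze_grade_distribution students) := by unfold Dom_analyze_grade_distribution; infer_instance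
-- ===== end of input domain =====

-- B computes each cumulative bucket by bisecting the sorted grade list once, instead of A's per-student chain of threshold ifs (alternative algorithm, same result).

-- ===== PORT A =====
-- student['grade']; KeyError (missing key) is excluded by Pre_, so the getD default is never the value used under the claim
def pvGrade (s : List (String × Int)) : Int := ((PySem.Dict.mk s).get? "grade").getD 0

-- the body of A's for-loop, acting on the letter_grades dict
def pvStep (d : PySem.Dict String Int) (student : List (String × Int)) : PySem.Dict String Int :=
  let d := if pvGrade student ≥ 90 then d.modify "A (90-100)" 0 (· + 1) else d
  let d := if pvGrade student ≥ 80 then d.modify "B (80-89)" 0 (· + 1) else d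
  let d := if pvGrade student ≥ 70 then d.modify "C (70-79)" 0 (· + 1) else d
  let d := if pvGrade student ≥ 60 then d.modify "D (60-69)" 0 (· + 1)
           else d.modify "F (0-59)" 0 (· + 1)
  d

def analyze_grade_distribution (students : List (List (String × Int))) : List (String × Int) :=
  (students.foldl pvStep
    (PySem.Dict.mk [("A (90-100)", 0), ("B (80-89)", 0), ("C (70-79)", 0),
                    ("D (60-69)", 0), ("F (0-59)", 0)])).items

-- ===== PORT B =====
-- Source B's hand-written _bisect_left is exactly Python's bisect_left; ported as the PySem primitive (exact).
def analyze_grade_distribution_alt (students : List (List (String × Int))) : List (String × Int) :=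
  let grades := PySem.List.sorted (students.map pvGrade) (fun x => x) false
  let n : Int := grades.length
  [("A (90-100)", n - (PySem.List.bisectLeft grades 90 : Int)),
   ("B (80-89)", n - (PySem.List.bisectLeft grades 80 : Int)),
   ("C (70-79)", n - (PySem.List.bisectLeft grades 70 : Int)),
   ("D (60-69)", n - (PySem.List.bisectLeft grades 60 : Int)),
   ("F (0-59)", (PySem.List.bisectLeft grades 60 : Int))]

-- ===== PRECONDITION & SPEC =====
-- Pre_ excludes exactly the inputs containing a student without a 'grade' key, on which Python A raises KeyError.
def Pre_analyze_grade_distribution (students : List (List (String × Int))) : Prop :=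
  ∀ s ∈ students, "grade" ∈ s.map Prod.fst
instance (students : List (List (String × Int))) : Decidable (Pre_analyze_grade_distribution students) := by unfold Pre_analyze_grade_distribution; infer_instance

def pvWitness_analyze_grade_distribution : (List (List (String × Int))) := [[("grade", 95)], [("grade", 61)], [("grade", 12)]]

def Spec_analyze_grade_distribution (students : List (List (String × Int))) (out : List (String × Int)) : Prop := out = analyze_grade_distribution_alt students
instance (students : List (List (String × Int))) (out : List (String × Int)) : Decidable (Spec_analyze_grade_distribution students out) := by unfold Spec_analyze_grade_distribution; infer_instance

-- ===== CLAIM (what is proved, stated in full; the proofs are below) =====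
def Claim_equal_analyze_grade_distribution : Prop := ∀ (students : List (List (String × Int))), Dom_analyze_grade_distribution students → Pre_analyze_grade_distribution students → Spec_analyze_grade_distribution students (analyze_grade_distribution students)

-- ===== LEMMAS AND PROOFS =====

def pvMk5 (a b c d e : Int) : PySem.Dict String Int :=
  PySem.Dict.mk [("A (90-100)", a), ("B (80-89)", b), ("C (70-79)", c),
                 ("D (60-69)", d), ("F (0-59)", e)]

-- one loop iteration bumps exactly the buckets whose threshold the grade meets
theorem pvStep_eq (a b c d e : Int) (s : List (String × Int)) :
    pvStep (pvMk5 a b c d e) s =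
    pvMk5 (a + if pvGrade s ≥ 90 then 1 else 0) (b + if pvGrade s ≥ 80 then 1 else 0)
          (c + if pvGrade s ≥ 70 then 1 else 0) (d + if pvGrade s ≥ 60 then 1 else 0)
          (e + if pvGrade s < 60 then 1 else 0) := by
  by_cases h90 : pvGrade s ≥ 90 <;> by_cases h80 : pvGrade s ≥ 80 <;>
    by_cases h70 : pvGrade s ≥ 70 <;> by_cases h60 : pvGrade s ≥ 60 <;>
    first
    | (exfalso; omega)
    | (have h60' : ¬ pvGrade s < 60 := by omega
       simp [pvStep, pvMk5, h90, h80, h70, h60, h60',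
         PySem.Dict.modify, PySem.Dict.getD, PySem.Dict.get?, PySem.Dict.insert,
         PySem.Dict.contains])
    | (have h60' : pvGrade s < 60 := by omega
       simp [pvStep, pvMk5, h90, h80, h70, h60, h60',
         PySem.Dict.modify, PySem.Dict.getD, PySem.Dict.get?, PySem.Dict.insert,
         PySem.Dict.contains])

-- A's fold, starting from arbitrary counts, adds the cumulative threshold counts of the remaining students
theorem pv_fold_inv (l : List (List (String × Int))) (a b c d e : Int) :
    l.foldl pvStep (pvMk5 a b c d e) =
    pvMk5 (a + (l.countP (fun s => pvGrade s ≥ 90) : Int))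
          (b + (l.countP (fun s => pvGrade s ≥ 80) : Int))
          (c + (l.countP (fun s => pvGrade s ≥ 70) : Int))
          (d + (l.countP (fun s => pvGrade s ≥ 60) : Int))
          (e + (l.countP (fun s => pvGrade s < 60) : Int)) := by
  induction l generalizing a b c d e with
  | nil => simp
  | cons hd tl ih =>
    rw [List.foldl_cons, pvStep_eq, ih]
    simp only [List.countP_cons, pvMk5, PySem.Dict.mk.injEq, List.cons.injEq, Prod.mk.injEq,
      true_and, and_true, decide_eq_true_eq]
    refine ⟨?_, ?_, ?_, ?_, ?_⟩ <;> (split_ifs <;> (push_cast; omega))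

-- bisect_left on a sorted list counts the elements below the probe
theorem pv_bisect_eq_countP (xs : List Int) (t : Int)
    (h : xs.Pairwise (fun x y => x ≤ y)) :
    (PySem.List.bisectLeft xs t : Int) = (xs.countP (fun x => x < t) : Int) := by
  obtain ⟨hle, hlt, hge⟩ := PySem.List.bisectLeft_spec xs t h
  set k := PySem.List.bisectLeft xs t with hk
  have hsplit : xs = xs.take k ++ xs.drop k := (List.take_append_drop k xs).symm
  have h1 : (xs.take k).countP (fun x => x < t) = (xs.take k).length := by
    rw [List.countP_eq_length]
    intro x hx
    rw [List.mem_take_iff_getElem] at hx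
    obtain ⟨i, hi, rfl⟩ := hx
    simp only [decide_eq_true_eq]
    exact hlt i (by omega) (by omega)
  have h2 : (xs.drop k).countP (fun x => x < t) = 0 := by
    rw [List.countP_eq_zero]
    intro x hx
    rw [List.mem_drop_iff_getElem] at hx
    obtain ⟨i, hi, rfl⟩ := hx
    simp only [decide_eq_true_eq, not_lt]
    exact hge (k + i) (by omega) (by omega)
  have : xs.countP (fun x => x < t) = k := by
    conv_lhs => rw [hsplit]
    rw [List.countP_append, h1, h2, List.length_take]
    omega
  omega

theorem pv_main_eq (students : List (List (String × Int))) :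
    analyze_grade_distribution students = analyze_grade_distribution_alt students := by
  unfold analyze_grade_distribution analyze_grade_distribution_alt
  have hinit : (PySem.Dict.mk [("A (90-100)", (0:Int)), ("B (80-89)", 0), ("C (70-79)", 0),
                    ("D (60-69)", 0), ("F (0-59)", 0)]) = pvMk5 0 0 0 0 0 := rfl
  rw [hinit, pv_fold_inv]
  have hpair : (PySem.List.sorted (students.map pvGrade) (fun x => x) false).Pairwise
      (fun a b => a ≤ b) := PySem.List.sorted_pairwise _ _
  have hperm : (PySem.List.sorted (students.map pvGrade) (fun x => x) false).Perm
      (students.map pvGrade) := PySem.List.sorted_perm _ _ _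
  have hbis : ∀ t : Int, (PySem.List.bisectLeft
      (PySem.List.sorted (students.map pvGrade) (fun x => x) false) t : Int)
      = (students.countP (fun s => pvGrade s < t) : Int) := by
    intro t
    rw [pv_bisect_eq_countP _ t hpair, hperm.countP_eq, List.countP_map]
    rfl
  have hlen : (PySem.List.sorted (students.map pvGrade) (fun x => x) false).length
      = students.length := by rw [hperm.length_eq, List.length_map]
  have hcomp : ∀ t : Int, students.countP (fun s => t ≤ pvGrade s)
      + students.countP (fun s => pvGrade s < t) = students.length := by
    intro t
    have := List.length_eq_countP_add_countP (l := students) (p := fun s => decide (t ≤ pvGrade s))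
    rw [this]
    congr 1
    apply List.countP_congr
    intro x _
    simp [not_le]
  simp only [pvMk5, zero_add, hbis, hlen]
  simp only [List.cons.injEq, Prod.mk.injEq, true_and, and_true]
  have h90 := hcomp 90; have h80 := hcomp 80; have h70 := hcomp 70; have h60 := hcomp 60
  have e90 : students.countP (fun s => pvGrade s ≥ 90) = students.countP (fun s => (90:Int) ≤ pvGrade s) := rfl
  have e80 : students.countP (fun s => pvGrade s ≥ 80) = students.countP (fun s => (80:Int) ≤ pvGrade s) := rfl
  have e70 : students.countP (fun s => pvGrade s ≥ 70) = students.countP (fun s => (70:Int) ≤ pvGrade s) := rfl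
  have e60 : students.countP (fun s => pvGrade s ≥ 60) = students.countP (fun s => (60:Int) ≤ pvGrade s) := rfl
  exact ⟨by rw [e90]; omega, by rw [e80]; omega, by rw [e70]; omega, by rw [e60]; omega⟩

-- ===== VERDICT (by name: the statement is the Claim_ definition above) =====
theorem analyze_grade_distribution_spec : Claim_equal_analyze_grade_distribution := by
  intro students _ _
  exact pv_main_eq students
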